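-- pv_equiv track=rewrite | github.com/iesl/institution_hierarchies | src/main/scripts/create_dataset.py | get_split2grid
-- ===== SOURCE A (Python) =====
-- def get_split2grid(dict_split2comp, dict_comp2grid):
--     '''
--     Get dictionary of split to list of grid_id
--
--     :return:
--     '''
--
--     # Get dictionary of split to the grid_id in that split
--     dict_split2grid = {}
--     for (split_idx, list_comp_id) in dict_split2comp.items():
--         set_grid_id = set()
--
--         for comp_id in list_comp_id:
--             set_grid_id.update(dict_comp2grid[comp_id])
--
--         dict_split2grid[split_idx] = set_grid_id
--
--     # Get dictionary of split to the grid_id non in that split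
--     dict_split2non_grid = {}
--     all_splits = list(dict_split2grid.keys())
--     for split_id in all_splits:
--         non_splits = all_splits.copy()
--         non_splits.remove(split_id)
--
--         non_grid = set()
--         for split in non_splits:
--             non_grid.update(dict_split2grid[split])
--         dict_split2non_grid[split_id] = non_grid
--
--     return dict_split2grid, dict_split2non_grid
-- ===== SOURCE B (Python) =====
-- def _prefixes(sets):
--     # out[i] = union of sets[0..i-1]
--     out = []
--     run = set()
--     for s in sets:
--         out.append(run)
--         run = run | s
--     return out
--
--
-- def _suffixes(sets):
--     # out[i] = union of sets[i+1..]
--     out = []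
--     run = set()
--     for s in reversed(sets):
--         out.append(run)
--         run = s | run
--     out.reverse()
--     return out
--
--
-- def get_split2grid(dict_split2comp, dict_comp2grid):
--     # phase 1 unchanged: split -> set of grid ids in that split
--     dict_split2grid = {}
--     for split_idx, list_comp_id in dict_split2comp.items():
--         set_grid_id = set()
--         for comp_id in list_comp_id:
--             set_grid_id.update(dict_comp2grid[comp_id])
--         dict_split2grid[split_idx] = set_grid_id
--
--     # phase 2: prefix/suffix unions instead of a per-split scan of all others
--     splits = list(dict_split2grid.keys())
--     sets = [dict_split2grid[s] for s in splits]
--     pre = _prefixes(sets)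
--     suf = _suffixes(sets)
--     dict_split2non_grid = {}
--     for s, p, q in zip(splits, pre, suf):
--         dict_split2non_grid[s] = p | q
--     return dict_split2grid, dict_split2non_grid
-- ===== Notes on version B (the rewrite author's own statement) =====
-- stated objective: faster
-- what changed: The per-split union over all other splits' grid sets is replaced by one prefix-union pass and one suffix-union pass, so each split's non-grid set is prefix[i] | suffix[i] instead of a fresh scan of all other splits.
import Mathlib
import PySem

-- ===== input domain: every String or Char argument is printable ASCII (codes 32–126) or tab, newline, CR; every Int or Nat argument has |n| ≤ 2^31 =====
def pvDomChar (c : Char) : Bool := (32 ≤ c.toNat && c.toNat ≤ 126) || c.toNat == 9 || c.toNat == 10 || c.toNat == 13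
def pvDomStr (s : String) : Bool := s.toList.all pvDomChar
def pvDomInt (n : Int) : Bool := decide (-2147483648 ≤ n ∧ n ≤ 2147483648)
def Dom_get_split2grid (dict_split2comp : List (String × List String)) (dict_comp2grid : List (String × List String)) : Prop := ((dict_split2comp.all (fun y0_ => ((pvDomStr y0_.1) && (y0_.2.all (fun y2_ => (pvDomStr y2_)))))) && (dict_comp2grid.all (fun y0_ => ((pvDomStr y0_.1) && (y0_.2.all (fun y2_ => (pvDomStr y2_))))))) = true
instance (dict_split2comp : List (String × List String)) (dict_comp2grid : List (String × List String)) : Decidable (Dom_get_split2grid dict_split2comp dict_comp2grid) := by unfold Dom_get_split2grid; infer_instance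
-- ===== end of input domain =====

-- B replaces A's per-split union over all other splits' grid sets by one prefix-union pass
-- and one suffix-union pass (non_grid(i) = prefix[i] | suffix[i]); objective: faster.

-- ===== PORT A =====
-- phase 1, textually identical in both Pythons (shared helper): split -> set of grid ids in that split.
-- dict_comp2grid[comp_id] is ported as getD with default []; under Pre_ the key is always present
-- (Python raises KeyError exactly on the inputs Pre_ excludes).
def pvBuildSplit2Grid (dict_split2comp : List (String × List String)) (dict_comp2grid : List (String × List String)) : PySem.Dict String (List String) :=
  (PySem.Dict.ofList dict_split2comp).items.foldl
    (fun d p =>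
      d.insert p.1
        (p.2.foldl (fun st c => PySem.Set.update st ((PySem.Dict.ofList dict_comp2grid).getD c [])) PySem.Set.empty))
    PySem.Dict.empty

def get_split2grid (dict_split2comp : List (String × List String)) (dict_comp2grid : List (String × List String)) : (List (String × List String)) × (List (String × List String)) :=
  let ds2g := pvBuildSplit2Grid dict_split2comp dict_comp2grid
  let all_splits := ds2g.keys
  let ds2ng := all_splits.foldl
    (fun d sid =>
      -- non_splits = all_splits.copy(); non_splits.remove(split_id) — sid is drawn from all_splits, so remove? never fails; getD is the total form
      let non_splits := (PySem.List.remove? all_splits sid).getD all_splits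
      -- dict_split2grid[split] is always present; getD [] is the total form
      d.insert sid (non_splits.foldl (fun st sp => PySem.Set.update st (ds2g.getD sp [])) PySem.Set.empty))
    PySem.Dict.empty
  (ds2g.items, ds2ng.items)

-- ===== PORT B =====
def pvPrefixes (sets : List (PySem.Set String)) : List (PySem.Set String) :=
  (sets.foldl (fun (st : List (PySem.Set String) × PySem.Set String) s =>
      (st.1 ++ [st.2], PySem.Set.union st.2 s)) ([], PySem.Set.empty)).1

def pvSuffixes (sets : List (PySem.Set String)) : List (PySem.Set String) :=
  ((sets.reverse.foldl (fun (st : List (PySem.Set String) × PySem.Set String) s =>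
      (st.1 ++ [st.2], PySem.Set.union s st.2)) ([], PySem.Set.empty)).1).reverse

def get_split2grid_alt (dict_split2comp : List (String × List String)) (dict_comp2grid : List (String × List String)) : (List (String × List String)) × (List (String × List String)) :=
  let ds2g := pvBuildSplit2Grid dict_split2comp dict_comp2grid
  let splits := ds2g.keys
  let sets := splits.map (fun s => ds2g.getD s [])   -- keys of ds2g are always present; getD [] is the total form
  let pre := pvPrefixes sets
  let suf := pvSuffixes sets
  let ds2ng := (splits.zip (pre.zip suf)).foldl
    (fun d t => d.insert t.1 (PySem.Set.union t.2.1 t.2.2)) PySem.Dict.empty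
  (ds2g.items, ds2ng.items)

-- ===== PRECONDITION & SPEC =====
-- Pre_ excludes exactly the inputs on which Python A raises KeyError: some comp_id listed for a
-- split (after Python's dict conversion of the argument) is not a key of dict_comp2grid.
def Pre_get_split2grid (dict_split2comp : List (String × List String)) (dict_comp2grid : List (String × List String)) : Prop :=
  ∀ p ∈ (PySem.Dict.ofList dict_split2comp).items, ∀ c ∈ p.2, (PySem.Dict.ofList dict_comp2grid).contains c = true
instance (dict_split2comp : List (String × List String)) (dict_comp2grid : List (String × List String)) : Decidable (Pre_get_split2grid dict_split2comp dict_comp2grid) := by unfold Pre_get_split2grid; infer_instance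

def pvWitness_get_split2grid : (List (String × List String)) × (List (String × List String)) :=
  ([("train", ["c1", "c2"]), ("dev", ["c2"])], [("c1", ["g1"]), ("c2", ["g2", "g1"])])

def Spec_get_split2grid (dict_split2comp : List (String × List String)) (dict_comp2grid : List (String × List String)) (out : (List (String × List String)) × (List (String × List String))) : Prop := out = get_split2grid_alt dict_split2comp dict_comp2grid
instance (dict_split2comp : List (String × List String)) (dict_comp2grid : List (String × List String)) (out : (List (String × List String)) × (List (String × List String))) : Decidable (Spec_get_split2grid dict_split2comp dict_comp2grid out) := by unfold Spec_get_split2grid; infer_instance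

-- ===== CLAIM (what is proved, stated in full; the proofs are below) =====
def Claim_equal_get_split2grid : Prop := ∀ (dict_split2comp : List (String × List String)) (dict_comp2grid : List (String × List String)), Dom_get_split2grid dict_split2comp dict_comp2grid → Pre_get_split2grid dict_split2comp dict_comp2grid → Spec_get_split2grid dict_split2comp dict_comp2grid (get_split2grid dict_split2comp dict_comp2grid)

-- ===== LEMMAS AND PROOFS =====

theorem pv_foldl_update {α : Type} (l : List α) (f : α → List String) (a : List String) :
    l.foldl (fun st c => PySem.Set.update st (f c)) (PySem.Set.ofList a)
      = PySem.Set.ofList (a ++ (l.map f).flatten) := by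
  induction l generalizing a with
  | nil => simp
  | cons x l ih =>
    simp only [List.foldl_cons, List.map_cons, List.flatten_cons]
    rw [← PySem.Set.ofList_append, ih, List.append_assoc]

theorem pv_update_ofList (s : PySem.Set String) (b : List String) :
    PySem.Set.update s (PySem.Set.ofList b) = PySem.Set.update s b := by
  rw [PySem.Set.update_eq_append_filter, PySem.Set.update_eq_append_filter, PySem.Set.ofList_ofList]

theorem pv_foldr_union (l : List (List String)) (h : ∀ x ∈ l, x.Nodup) :
    l.foldr (fun x r => PySem.Set.union x r) PySem.Set.empty
      = PySem.Set.ofList l.flatten := by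
  induction l with
  | nil => rfl
  | cons x l ih =>
    have hx : PySem.Set.ofList x = x := PySem.Set.ofList_eq_self_of_nodup _ (h x (by simp))
    simp only [List.foldr_cons, List.flatten_cons]
    rw [ih (fun y hy => h y (by simp [hy]))]
    show PySem.Set.update x _ = _
    rw [pv_update_ofList]
    conv_lhs => rw [← hx]
    rw [← PySem.Set.ofList_append]

theorem pv_gen_char {α β : Type} (l : List α) (g : β → α → β) (acc : List β) (r : β) :
    (l.foldl (fun st s => (st.1 ++ [st.2], g st.2 s)) (acc, r)).1
      = acc ++ (List.range l.length).map (fun i => (l.take i).foldl g r) := by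
  induction l generalizing acc r with
  | nil => simp
  | cons s l ih =>
    simp only [List.foldl_cons, List.length_cons]
    rw [ih, List.range_succ_eq_map]
    simp [List.map_map, Function.comp_def, List.append_assoc]

theorem pv_gen_char' {α β : Type} (l : List α) (g : α → β → β) (acc : List β) (r : β) :
    (l.foldl (fun st s => (st.1 ++ [st.2], g s st.2)) (acc, r)).1
      = acc ++ (List.range l.length).map (fun i => (l.take i).foldl (fun b a => g a b) r) :=
  pv_gen_char l (fun b a => g a b) acc r

theorem pv_prefixes_length (xs : List (PySem.Set String)) : (pvPrefixes xs).length = xs.length := by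
  unfold pvPrefixes; rw [pv_gen_char]; simp

theorem pv_suffixes_length (xs : List (PySem.Set String)) : (pvSuffixes xs).length = xs.length := by
  unfold pvSuffixes; rw [pv_gen_char']; simp

theorem pv_prefixes_getElem (xs : List (PySem.Set String)) (i : Nat) (h : i < xs.length) :
    (pvPrefixes xs)[i]'(by rw [pv_prefixes_length]; exact h)
      = (xs.take i).foldl (fun r s => PySem.Set.union r s) PySem.Set.empty := by
  unfold pvPrefixes
  simp only [pv_gen_char, List.nil_append, List.getElem_map, List.getElem_range]

theorem pv_suffixes_getElem (xs : List (PySem.Set String)) (i : Nat) (h : i < xs.length) :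
    (pvSuffixes xs)[i]'(by rw [pv_suffixes_length]; exact h)
      = (xs.drop (i+1)).foldr (fun s r => PySem.Set.union s r) PySem.Set.empty := by
  unfold pvSuffixes
  simp only [pv_gen_char', List.nil_append, List.getElem_reverse, List.getElem_map,
    List.getElem_range, List.length_map, List.length_range, List.length_reverse]
  have htake : xs.reverse.take (xs.length - 1 - i) = (xs.drop (i+1)).reverse := by
    have h2 : xs.length - 1 - i = xs.length - (i+1) := by omega
    rw [h2, ← List.reverse_drop]
  rw [htake, List.foldl_reverse]

theorem pv_items_val (L : List (String × List String)) (v : String × List String → List String)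
    (d : PySem.Dict String (List String)) (hd : ∀ q ∈ d.items, q.2.Nodup)
    (hv : ∀ p, (v p).Nodup) :
    ∀ q ∈ (L.foldl (fun d p => d.insert p.1 (v p)) d).items, q.2.Nodup := by
  induction L generalizing d with
  | nil => exact hd
  | cons p L ih =>
    simp only [List.foldl_cons]
    refine ih _ ?_
    intro q hq
    rcases (PySem.Dict.mem_items_insert _ _ _ _).1 hq with h | h
    · rw [h]; exact hv p
    · exact hd q h.1

theorem pv_getD_nodup (d : PySem.Dict String (List String))
    (h : ∀ q ∈ d.items, q.2.Nodup) (k : String) : (d.getD k []).Nodup := by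
  cases hg : d.get? k with
  | none => rw [PySem.Dict.getD_of_get?_eq_none _ _ hg]; exact List.nodup_nil
  | some v =>
    rw [PySem.Dict.getD_of_get?_eq_some _ _ hg]
    exact h (k, v) (PySem.Dict.mem_items_of_get?_eq_some _ hg)

theorem pv_foldl_update0 {α : Type} (l : List α) (f : α → List String) :
    l.foldl (fun st c => PySem.Set.update st (f c)) PySem.Set.empty
      = PySem.Set.ofList ((l.map f).flatten) :=
  pv_foldl_update l f []

theorem pv_union_foldl (l : List (PySem.Set String)) :
    l.foldl (fun r s => PySem.Set.union r s) PySem.Set.empty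
      = PySem.Set.ofList l.flatten := by
  have h := pv_foldl_update0 l (fun x => x)
  simpa using h

theorem pv_build_vals (s2c c2g : List (String × List String)) :
    ∀ q ∈ (pvBuildSplit2Grid s2c c2g).items, q.2.Nodup := by
  unfold pvBuildSplit2Grid
  refine pv_items_val _ _ _ (by simp [PySem.Dict.empty]) ?_
  intro p
  have h := pv_foldl_update p.2 (fun c => (PySem.Dict.ofList c2g).getD c []) []
  rw [show (PySem.Set.empty : PySem.Set String) = PySem.Set.ofList [] from rfl, h]
  exact PySem.Set.nodup_ofList _

theorem pv_build_keys_nodup (s2c c2g : List (String × List String)) :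
    (pvBuildSplit2Grid s2c c2g).keys.Nodup := by
  unfold pvBuildSplit2Grid
  exact PySem.Dict.nodup_keys_foldl_insert_key _ Prod.fst _ _ PySem.Dict.nodup_keys_empty

theorem get_split2grid_spec : Claim_equal_get_split2grid := by
  intro s2c c2g _ _
  unfold Spec_get_split2grid get_split2grid get_split2grid_alt
  dsimp only
  refine congrArg (Prod.mk _) ?_
  have hks : (pvBuildSplit2Grid s2c c2g).keys.Nodup := pv_build_keys_nodup s2c c2g
  have hvals := pv_build_vals s2c c2g
  have hA := PySem.Dict.items_foldl_insert_fresh (pvBuildSplit2Grid s2c c2g).keys (fun a => a)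
      (fun sid => List.foldl (fun st sp => PySem.Set.update st ((pvBuildSplit2Grid s2c c2g).getD sp [])) PySem.Set.empty
              ((PySem.List.remove? (pvBuildSplit2Grid s2c c2g).keys sid).getD (pvBuildSplit2Grid s2c c2g).keys))
      PySem.Dict.empty (fun a _ => PySem.Dict.contains_empty a) (by simpa using hks)
  have hndB : (List.map Prod.fst ((pvBuildSplit2Grid s2c c2g).keys.zip
          ((pvPrefixes (List.map (fun s => (pvBuildSplit2Grid s2c c2g).getD s []) (pvBuildSplit2Grid s2c c2g).keys)).zip
            (pvSuffixes (List.map (fun s => (pvBuildSplit2Grid s2c c2g).getD s []) (pvBuildSplit2Grid s2c c2g).keys))))).Nodup := by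
    rw [List.map_fst_zip]
    · exact hks
    · simp [List.length_zip, pv_prefixes_length, pv_suffixes_length]
  have hB := PySem.Dict.items_foldl_insert_fresh ((pvBuildSplit2Grid s2c c2g).keys.zip
          ((pvPrefixes (List.map (fun s => (pvBuildSplit2Grid s2c c2g).getD s []) (pvBuildSplit2Grid s2c c2g).keys)).zip
            (pvSuffixes (List.map (fun s => (pvBuildSplit2Grid s2c c2g).getD s []) (pvBuildSplit2Grid s2c c2g).keys))))
      Prod.fst (fun t => PySem.Set.union t.2.1 t.2.2)
      PySem.Dict.empty (fun a _ => PySem.Dict.contains_empty _) hndB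
  rw [hA, hB]
  refine congrArg _ ?_
  apply List.ext_getElem
  · simp [List.length_zip, pv_prefixes_length, pv_suffixes_length]
  intro i h1 h2
  simp only [List.getElem_map, List.getElem_zip]
  have hi : i < (pvBuildSplit2Grid s2c c2g).keys.length := by simpa using h1
  have hsets : ∀ x ∈ (List.map (fun s => (pvBuildSplit2Grid s2c c2g).getD s []) (pvBuildSplit2Grid s2c c2g).keys), x.Nodup := by
    intro x hx
    rcases List.mem_map.1 hx with ⟨s, _, rfl⟩
    exact pv_getD_nodup _ hvals s
  refine congrArg (Prod.mk _) ?_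
  rw [PySem.List.remove?_eq_some_erase _ _ (List.getElem_mem hi), Option.getD_some,
      List.Nodup.erase_getElem hks i hi, List.eraseIdx_eq_take_drop_succ,
      pv_foldl_update0, pv_prefixes_getElem _ i (by simpa using hi),
      pv_suffixes_getElem _ i (by simpa using hi),
      pv_union_foldl, pv_foldr_union _ (fun x hx => hsets x (List.mem_of_mem_drop hx))]
  show PySem.Set.ofList _ = PySem.Set.update _ _
  rw [pv_update_ofList, ← PySem.Set.ofList_append]
  refine congrArg PySem.Set.ofList ?_
  simp [List.map_append, List.map_take, List.map_drop, List.flatten_append]
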